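-- pv_equiv track=rewrite | github.com/0xef876/STUDY | python/Date_230630_BOJ_2877.py | solve
-- ===== SOURCE A (Python) =====
-- def solve(n):
--     if n == 1:
--         return 4
--     elif n == 2:
--         return 7
--     else:
--         if n % 2 != 0:
--             return solve(n//2) * 10 + 4
--         else:
--             return solve(n//2 - 1) * 10 + 7
-- ===== SOURCE B (Python) =====
-- def solve(n):
--     # n-th number whose digits are only 4 and 7, as a bijective base-2 numeral:
--     # n+1 in binary, with the leading 1 dropped, reading 0 as '4' and 1 as '7'.
--     m = n + 1
--     d = m.bit_length() - 1
--     acc = 0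
--     for i in range(d - 1, -1, -1):
--         acc = acc * 10 + (7 if (m >> i) & 1 else 4)
--     return acc
-- ===== Notes on version B (the rewrite author's own statement) =====
-- stated objective: simpler
-- what changed: B replaces A's least-significant-first recursion by a direct bijective-base-2 reading: it takes the binary digits of n+1 below the leading bit and maps 0/1 to 4/7 in one most-significant-first loop.
import Mathlib
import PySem

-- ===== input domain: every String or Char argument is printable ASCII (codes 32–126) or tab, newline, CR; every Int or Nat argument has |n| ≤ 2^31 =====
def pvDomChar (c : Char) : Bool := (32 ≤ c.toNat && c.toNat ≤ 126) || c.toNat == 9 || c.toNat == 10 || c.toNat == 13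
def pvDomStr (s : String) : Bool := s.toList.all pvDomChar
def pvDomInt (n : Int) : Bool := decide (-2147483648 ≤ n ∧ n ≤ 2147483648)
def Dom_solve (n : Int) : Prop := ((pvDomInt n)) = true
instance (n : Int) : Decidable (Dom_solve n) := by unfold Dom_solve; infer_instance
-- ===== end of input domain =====

-- B differs from A structurally only: same O(log n) answer, built MSB-first from the
-- binary digits of n+1 instead of A's LSB-first recursion.  Pre_ excludes n ≤ 0, where
-- the Python A recurses forever (RecursionError).

-- ===== PORT A =====
-- Literal port of A's recursion; the 'n ≤ 0' guard only makes the recursion total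
-- (Python A never returns there; such n are outside Pre_solve).
def solve (n : Int) : Int :=
  if n = 1 then 4
  else if n = 2 then 7
  else if n ≤ 0 then 0
  else if PySem.Int.mod n 2 ≠ 0 then
    solve (PySem.Int.floordiv n 2) * 10 + 4
  else
    solve (PySem.Int.floordiv n 2 - 1) * 10 + 7
termination_by n.toNat
decreasing_by
  · have h := PySem.Int.floordiv_eq_ediv_of_pos (a := n) (b := 2) (by omega)
    omega
  · have h := PySem.Int.floordiv_eq_ediv_of_pos (a := n) (b := 2) (by omega)
    omega

-- ===== PORT B =====
-- Source B: m = n+1; d = m.bit_length()-1; acc-loop for i in range(d-1,-1,-1).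
-- For m ≥ 1, m.bit_length()-1 = Nat.log2 m; range(d-1,-1,-1) = (List.range d).reverse.
def solve_alt (n : Int) : Int :=
  let m : Nat := (n + 1).toNat
  let d : Nat := Nat.log2 m
  (List.range d).reverse.foldl
    (fun acc i => acc * 10 + (if (m >>> i) % 2 = 1 then 7 else 4)) 0

-- ===== PRECONDITION & SPEC =====
-- Pre_ excludes n ≤ 0: there the Python A never returns (infinite recursion → RecursionError).
def Pre_solve (n : Int) : Prop := 1 ≤ n
instance (n : Int) : Decidable (Pre_solve n) := by unfold Pre_solve; infer_instance
def pvWitness_solve : Int := (5)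

def Spec_solve (n : Int) (out : Int) : Prop := out = solve_alt n
instance (n : Int) (out : Int) : Decidable (Spec_solve n out) := by unfold Spec_solve; infer_instance

-- ===== CLAIM (what is proved, stated in full; the proofs are below) =====
def Claim_equal_solve : Prop := ∀ (n : Int), Dom_solve n → Pre_solve n → Spec_solve n (solve n)

-- ===== LEMMAS AND PROOFS =====

-- B's digit builder on the Nat m = n+1.
def pvG (m : Nat) : Int :=
  (List.range (Nat.log2 m)).reverse.foldl
    (fun acc i => acc * 10 + (if (m >>> i) % 2 = 1 then 7 else 4)) 0

theorem pvShift (m i : Nat) : m >>> (i + 1) = (m / 2) >>> i := by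
  rw [Nat.shiftRight_succ_inside]

theorem pvG_step (m : Nat) (hm : 2 ≤ m) :
    pvG m = pvG (m / 2) * 10 + (if m % 2 = 1 then 7 else 4) := by
  have hd : Nat.log2 m = Nat.log2 (m / 2) + 1 := by
    rw [Nat.log2_def, if_pos hm]
  set d := Nat.log2 (m / 2) with hdd
  have hrange : (List.range (d + 1)).reverse
      = ((List.range d).reverse.map Nat.succ) ++ [0] := by
    rw [List.range_succ_eq_map, List.reverse_cons, List.map_reverse]
  have hfun : (fun (acc : Int) (i : Nat) =>
        acc * 10 + (if (m >>> (Nat.succ i)) % 2 = 1 then (7:Int) else 4))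
      = (fun (acc : Int) (i : Nat) =>
        acc * 10 + (if ((m / 2) >>> i) % 2 = 1 then (7:Int) else 4)) := by
    funext acc i
    rw [show Nat.succ i = i + 1 from rfl, pvShift]
  unfold pvG
  rw [hd, hrange, List.foldl_append, List.foldl_map, hfun]
  simp only [List.foldl_reverse]
  rfl

theorem pvG_one : pvG 1 = 0 := by
  unfold pvG
  rw [show Nat.log2 1 = 0 by rw [Nat.log2_def]; simp]
  rfl

-- A's recursion matches pvG (k+1) for every k ≥ 1.
theorem solve_eq_pvG (k : Nat) (hk : 1 ≤ k) : solve (k : Int) = pvG (k + 1) := by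
  induction k using Nat.strong_induction_on with
  | _ k ih =>
    match k, hk with
    | 1, _ =>
      rw [solve, pvG_step 2 (by omega), pvG_one]; norm_num
    | 2, _ =>
      rw [solve, pvG_step 3 (by omega), pvG_one]; norm_num
    | (j+3), _ =>
      set k := j + 3 with hkdef
      have hk3 : (3:Int) ≤ (k : Int) := by exact_mod_cast Nat.le_add_left 3 j
      have hmod : PySem.Int.mod (k : Int) 2 = ((k % 2 : Nat) : Int) :=
        PySem.Int.mod_natCast k 2
      have hdiv : PySem.Int.floordiv (k : Int) 2 = ((k / 2 : Nat) : Int) :=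
        PySem.Int.floordiv_natCast k 2
      rw [solve]
      have h1 : ¬ ((k : Int) = 1) := by omega
      have h2 : ¬ ((k : Int) = 2) := by omega
      have h0 : ¬ ((k : Int) ≤ 0) := by omega
      rw [if_neg h1, if_neg h2, if_neg h0]
      by_cases hpar : k % 2 = 1
      · -- k odd: solve = solve (k/2) * 10 + 4 ; k+1 even
        have hne : PySem.Int.mod (k : Int) 2 ≠ 0 := by rw [hmod, hpar]; decide
        rw [if_pos hne, hdiv]
        have hrec : solve ((k / 2 : Nat) : Int) = pvG (k / 2 + 1) :=
          ih (k / 2) (by omega) (by omega)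
        rw [hrec]
        have hstep := pvG_step (k + 1) (by omega)
        have he : (k + 1) % 2 = 0 := by omega
        have hq : (k + 1) / 2 = k / 2 + 1 := by omega
        rw [hstep, he, hq]
        norm_num
      · -- k even: solve = solve (k/2 - 1) * 10 + 7 ; k+1 odd
        have hpar0 : k % 2 = 0 := by omega
        have hne : ¬ (PySem.Int.mod (k : Int) 2 ≠ 0) := by rw [hmod, hpar0]; decide
        rw [if_neg hne, hdiv]
        have hcast : ((k / 2 : Nat) : Int) - 1 = ((k / 2 - 1 : Nat) : Int) := by omega
        rw [hcast]
        have hrec : solve ((k / 2 - 1 : Nat) : Int) = pvG (k / 2 - 1 + 1) :=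
          ih (k / 2 - 1) (by omega) (by omega)
        rw [hrec]
        have hstep := pvG_step (k + 1) (by omega)
        have he : (k + 1) % 2 = 1 := by omega
        have hq : (k + 1) / 2 = k / 2 - 1 + 1 := by omega
        rw [hstep, he, hq]
        norm_num

theorem solve_alt_eq_pvG (n : Int) : solve_alt n = pvG ((n + 1).toNat) := by
  unfold solve_alt pvG
  rfl

-- ===== VERDICT (by name: the statement is the Claim_ definition above) =====
theorem solve_spec : Claim_equal_solve := by
  intro n _ hpre
  unfold Pre_solve at hpre
  unfold Spec_solve
  have hk : n = ((n.toNat : Nat) : Int) := by omega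
  rw [solve_alt_eq_pvG n]
  have h1 : (n + 1).toNat = n.toNat + 1 := by omega
  rw [h1]
  rw [hk]
  exact solve_eq_pvG n.toNat (by omega)
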